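-- pv_equiv track=rewrite | github.com/selyakova/31.01.2022 | 31.01.2022/Oma_modul.py | kustutamine
-- ===== SOURCE A (Python) =====
-- def kustutamine(nimi:str,palgad:list,nimed:list):
--     n=nimed.count(nimi)
--     pos=0
--     for j in range(n):
--         ind=nimed.index(nimi,pos)
--         pos=ind
--         nimed.remove(nimi)
--         palgad.pop(ind)
--     return palgad,nimed
-- ===== SOURCE B (Python) =====
-- def kustutamine(nimi: str, palgad: list, nimed: list):
--     # One pass: keep salaries whose index is not an occurrence of nimi,
--     # and keep names different from nimi; write back in place.
--     keep = [p for i, p in enumerate(palgad)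
--             if not (i < len(nimed) and nimed[i] == nimi)]
--     rest = [x for x in nimed if x != nimi]
--     palgad[:] = keep
--     nimed[:] = rest
--     return palgad, nimed
-- ===== Notes on version B (the rewrite author's own statement) =====
-- stated objective: alternative
-- what changed: A repeatedly rescans the lists with count/index/remove/pop; B builds the result in one filtering pass over each list (keep salaries whose index is not an occurrence of nimi, keep names != nimi) and writes it back in place.
import Mathlib
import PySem

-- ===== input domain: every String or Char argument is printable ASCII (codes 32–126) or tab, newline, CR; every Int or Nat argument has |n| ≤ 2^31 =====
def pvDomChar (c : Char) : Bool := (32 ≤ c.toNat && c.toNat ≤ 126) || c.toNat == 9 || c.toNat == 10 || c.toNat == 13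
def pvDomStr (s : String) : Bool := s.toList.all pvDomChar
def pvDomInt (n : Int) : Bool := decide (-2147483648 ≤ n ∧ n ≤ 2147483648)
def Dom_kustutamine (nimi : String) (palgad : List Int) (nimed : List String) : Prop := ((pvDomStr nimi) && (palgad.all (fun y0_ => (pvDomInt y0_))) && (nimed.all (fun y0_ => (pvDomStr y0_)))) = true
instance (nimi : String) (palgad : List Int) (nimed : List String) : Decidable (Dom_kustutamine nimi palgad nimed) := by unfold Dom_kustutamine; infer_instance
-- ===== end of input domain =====

-- B replaces A's repeated count/index/remove/pop rescans by one filtering pass per list (alternative).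
-- A mutates palgad/nimed in place; B performs the equivalent final in-place update, and the
-- equivalence proved here is about the RETURN value (where A raises, A leaves a partial mutation).

-- ===== PORT A =====
-- nimed.index(nimi, pos) with a non-negative start has no PySem primitive; ported by hand,
-- exact for 0 ≤ pos: search the suffix from pos and add pos back.
def pvIndexFrom? (xs : List String) (v : String) (pos : Nat) : Option Nat :=
  (PySem.List.index? (xs.drop pos) v).map (· + pos)

-- the 'for j in range(n)' loop of A: state (pos, palgad, nimed); none = a raised exception
def pvLoopA (nimi : String) : Nat → Nat × List Int × List String → Option (Nat × List Int × List String)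
  | 0, st => some st
  | k + 1, (pos, p, m) =>
    match pvIndexFrom? m nimi pos with
    | none => none
    | some ind =>
      match PySem.List.remove? m nimi with
      | none => none
      | some m' =>
        match PySem.List.pop? p (ind : Int) with
        | none => none
        | some r => pvLoopA nimi k (ind, r.2, m')

def kustutamine (nimi : String) (palgad : List Int) (nimed : List String) : List Int × List String :=
  match pvLoopA nimi (PySem.List.count nimed nimi) (0, palgad, nimed) with
  | some (_, p, m) => (p, m)
  | none => (palgad, nimed)   -- unreachable under Pre_ (A raises there)

-- ===== PORT B =====
def kustutamine_alt (nimi : String) (palgad : List Int) (nimed : List String) : List Int × List String :=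
  let keep := ((PySem.List.enumerate palgad 0).filter
      (fun ip => !(decide (ip.1 < (nimed.length : Int)) && (PySem.List.pyGetD nimed ip.1 "" == nimi)))).map (·.2)
  let rest := nimed.filter (fun x => x ≠ nimi)
  (keep, rest)

-- ===== PRECONDITION & SPEC =====
-- Pre_ excludes exactly the inputs where A raises IndexError: some occurrence of nimi in nimed
-- sits at an index beyond the end of palgad, so palgad.pop(ind) fails.
def Pre_kustutamine (nimi : String) (palgad : List Int) (nimed : List String) : Prop :=
  ∀ i, (h : i < nimed.length) → nimed[i] = nimi → i < palgad.length
instance (nimi : String) (palgad : List Int) (nimed : List String) : Decidable (Pre_kustutamine nimi palgad nimed) := by unfold Pre_kustutamine; infer_instance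

def pvWitness_kustutamine : String × List Int × List String := ("a", [1, 2, 3], ["a", "b", "a"])

def Spec_kustutamine (nimi : String) (palgad : List Int) (nimed : List String) (out : List Int × List String) : Prop := out = kustutamine_alt nimi palgad nimed
instance (nimi : String) (palgad : List Int) (nimed : List String) (out : List Int × List String) : Decidable (Spec_kustutamine nimi palgad nimed out) := by unfold Spec_kustutamine; infer_instance

-- ===== CLAIM (what is proved, stated in full; the proofs are below) =====
def Claim_equal_kustutamine : Prop := ∀ (nimi : String) (palgad : List Int) (nimed : List String), Dom_kustutamine nimi palgad nimed → Pre_kustutamine nimi palgad nimed → Spec_kustutamine nimi palgad nimed (kustutamine nimi palgad nimed)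

-- ===== LEMMAS AND PROOFS =====

-- keepF p m : keep the elements of p whose position in m does not hold nimi (trailing p kept)
def keepF (nimi : String) : List Int → List String → List Int
  | p, [] => p
  | [], _ :: _ => []
  | x :: p, y :: m => if y = nimi then keepF nimi p m else x :: keepF nimi p m

theorem keepF_of_not_mem (nimi : String) (p : List Int) (m : List String) (h : nimi ∉ m) :
    keepF nimi p m = p := by
  induction m generalizing p with
  | nil => cases p <;> rfl
  | cons y m ih =>
    cases p with
    | nil => rfl
    | cons x p =>
      have hy : y ≠ nimi := by rintro rfl; exact h (List.mem_cons_self ..)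
      simp only [keepF, if_neg hy, ih p (by simp_all)]

theorem index?_prefix (v : String) (l t : List String) (h : v ∉ l) :
    PySem.List.index? (l ++ v :: t) v = some l.length := by
  induction l with
  | nil => simpa using PySem.List.index?_cons_self v t
  | cons x l ih =>
    have hx : x ≠ v := by rintro rfl; exact h (List.mem_cons_self ..)
    rw [List.cons_append, PySem.List.index?_cons_of_ne _ hx, ih (by simp_all)]
    simp

theorem indexFrom_prefix (nimi : String) (a b : List String) (pos : Nat)
    (ha : nimi ∉ a) (hpos : pos ≤ a.length) :
    pvIndexFrom? (a ++ nimi :: b) nimi pos = some a.length := by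
  unfold pvIndexFrom?
  rw [List.drop_append_of_le_length hpos,
      index?_prefix nimi _ b (fun hm => ha (List.mem_of_mem_drop hm))]
  simp only [Option.map_some, List.length_drop]
  congr 1
  omega

theorem remove_prefix (nimi : String) (a b : List String) (ha : nimi ∉ a) :
    PySem.List.remove? (a ++ nimi :: b) nimi = some (a ++ b) := by
  induction a with
  | nil => simp
  | cons x a ih =>
    have hx : x ≠ nimi := by rintro rfl; exact ha (List.mem_cons_self ..)
    rw [List.cons_append, PySem.List.remove?_cons_of_ne _ hx, ih (by simp_all)]
    rfl

theorem pop_middle (p1 p2 : List Int) (z : Int) :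
    PySem.List.pop? (p1 ++ z :: p2) ((p1.length : Nat) : Int) = some (z, p1 ++ p2) := by
  rw [PySem.List.pop?_natCast _ _ (by simp)]
  rw [List.eraseIdx_append_of_length_le (le_refl p1.length)]
  simp [List.getElem_append_right]

theorem loopA_eq (nimi : String) (b : List String) :
    ∀ (p2 : List Int) (a : List String) (p1 : List Int) (pos : Nat),
    nimi ∉ a → p1.length = a.length → pos ≤ a.length →
    (∀ i, (h : i < b.length) → b[i] = nimi → i < p2.length) →
    ∃ pos', pvLoopA nimi (b.count nimi) (pos, p1 ++ p2, a ++ b)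
      = some (pos', p1 ++ keepF nimi p2 b, a ++ b.filter (fun x => x ≠ nimi)) := by
  induction b with
  | nil => intro p2 a p1 pos _ _ _ _; exact ⟨pos, by simp [pvLoopA, keepF]⟩
  | cons y b ih =>
    intro p2 a p1 pos ha hlen hpos hocc
    by_cases hy : y = nimi
    · subst hy
      cases p2 with
      | nil => exact absurd (hocc 0 (by simp) (by simp)) (by simp)
      | cons z p2' =>
        have hstep : (y :: b).count y = b.count y + 1 := by
          simp
        rw [hstep]
        simp only [pvLoopA, indexFrom_prefix y a b pos ha hpos,
          remove_prefix y a b ha, ← hlen, pop_middle p1 p2' z]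
        obtain ⟨pos', hrec⟩ := ih p2' a p1 p1.length ha hlen (le_of_eq hlen)
          (fun i h hi => by
            have := hocc (i + 1) (by simpa using Nat.succ_lt_succ h) (by simpa using hi)
            simpa using Nat.lt_of_succ_lt_succ this)
        refine ⟨pos', ?_⟩
        rw [hrec]
        simp [keepF]
    · cases p2 with
      | nil =>
        have hnb : nimi ∉ y :: b := by
          intro hm
          rcases List.getElem_of_mem hm with ⟨i, hi, hgi⟩
          exact absurd (hocc i hi hgi) (by simp)
        have hc : (y :: b).count nimi = 0 := List.count_eq_zero.mpr hnb
        rw [hc]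
        refine ⟨pos, ?_⟩
        simp only [pvLoopA, List.append_nil]
        rw [keepF_of_not_mem nimi [] (y :: b) hnb,
            List.filter_eq_self.mpr (fun x hx => by
              simp only [decide_eq_true_eq]
              rintro rfl; exact hnb hx)]
        simp
      | cons z p2' =>
        have hc : (y :: b).count nimi = b.count nimi := by
          simp [hy]
        obtain ⟨pos', hrec⟩ := ih p2' (a ++ [y]) (p1 ++ [z]) pos
          (by simp [ha]; exact fun h => hy h.symm) (by simp [hlen]) (by simp; omega)
          (fun i h hi => by
            have := hocc (i + 1) (by simpa using Nat.succ_lt_succ h) (by simpa using hi)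
            simpa using Nat.lt_of_succ_lt_succ this)
        refine ⟨pos', ?_⟩
        rw [hc]
        simp only [List.append_assoc, List.singleton_append] at hrec
        rw [hrec]
        simp [keepF, hy]

theorem keepB_eq (nimi : String) (nimed : List String) :
    ∀ (p : List Int) (s : Nat),
    ((PySem.List.enumerate p ((s : Nat) : Int)).filter
      (fun ip => !(decide (ip.1 < (nimed.length : Int)) && (PySem.List.pyGetD nimed ip.1 "" == nimi)))).map (·.2)
    = keepF nimi p (nimed.drop s) := by
  intro p
  induction p with
  | nil =>
    intro s
    cases h : nimed.drop s <;> simp [PySem.List.enumerate, keepF]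
  | cons x p ih =>
    intro s
    rw [PySem.List.enumerate_cons]
    by_cases hs : s < nimed.length
    · have hdrop : nimed.drop s = nimed[s] :: nimed.drop (s + 1) :=
        List.drop_eq_getElem_cons hs
      have hget : PySem.List.pyGetD nimed ((s : Nat) : Int) "" = nimed[s] := by
        rw [PySem.List.pyGetD_natCast]
        exact List.getD_eq_getElem _ _ hs
      rw [hdrop]
      by_cases he : nimed[s] = nimi
      · rw [List.filter_cons_of_neg (by simp [hget, he, hs])]
        have : ((s : Int) + 1) = (((s + 1 : Nat)) : Int) := by push_cast; ring
        rw [this, ih (s + 1)]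
        simp [keepF, he]
      · rw [List.filter_cons_of_pos (by simp [hget, he, hs])]
        have : ((s : Int) + 1) = (((s + 1 : Nat)) : Int) := by push_cast; ring
        rw [List.map_cons, this, ih (s + 1)]
        simp [keepF, he]
    · have hdrop : nimed.drop s = [] := List.drop_eq_nil_of_le (by omega)
      have hdrop' : nimed.drop (s + 1) = [] := List.drop_eq_nil_of_le (by omega)
      rw [List.filter_cons_of_pos (by simp; omega)]
      have : ((s : Int) + 1) = (((s + 1 : Nat)) : Int) := by push_cast; ring
      rw [List.map_cons, this, ih (s + 1), hdrop, hdrop']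
      cases p <;> simp [keepF]

theorem alt_eq (nimi : String) (palgad : List Int) (nimed : List String) :
    kustutamine_alt nimi palgad nimed
      = (keepF nimi palgad nimed, nimed.filter (fun x => x ≠ nimi)) := by
  unfold kustutamine_alt
  have := keepB_eq nimi nimed palgad 0
  simp only [Nat.cast_zero, List.drop_zero] at this
  rw [this]

-- ===== VERDICT (by name: the statement is the Claim_ definition above) =====
theorem kustutamine_spec : Claim_equal_kustutamine := by
  intro nimi palgad nimed _ hpre
  unfold Spec_kustutamine kustutamine
  obtain ⟨pos', h⟩ := loopA_eq nimi nimed palgad [] [] 0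
    (by simp) rfl (by simp)
    (fun i h hi => hpre i h hi)
  rw [PySem.List.count_eq]
  simp only [List.nil_append] at h
  rw [h, alt_eq]
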